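-- pv_equiv track=rewrite | github.com/SuperRatChef/riveria-python-2023 | osa04-19_listan_pisimmat/src/listan_pisimmat.py | pisimmat
-- ===== SOURCE A (Python) =====
-- def pisimmat(lista):
--     pisimmat = []
--     pisin_pituus = None
--
--     for sana in lista:
--         if pisin_pituus == None or pisin_pituus == len(sana):
--             pisin_pituus = len(sana)
--             pisimmat.append(sana)
--         elif pisin_pituus < len(sana):
--             pisimmat = [sana]
--             pisin_pituus = len(sana)
--         else:
--             continue
--     return pisimmat
-- ===== SOURCE B (Python) =====
-- def pisimmat(lista):
--     if not lista:
--         return []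
--     m = max(len(s) for s in lista)
--     return [s for s in lista if len(s) == m]
-- ===== Notes on version B (the rewrite author's own statement) =====
-- stated objective: simpler
-- what changed: Replaced the single-pass running-max-with-list-reset loop by a two-pass shape: compute the maximum length with max(), then filter the list for strings of that length (empty list guarded to return []).
import Mathlib
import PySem

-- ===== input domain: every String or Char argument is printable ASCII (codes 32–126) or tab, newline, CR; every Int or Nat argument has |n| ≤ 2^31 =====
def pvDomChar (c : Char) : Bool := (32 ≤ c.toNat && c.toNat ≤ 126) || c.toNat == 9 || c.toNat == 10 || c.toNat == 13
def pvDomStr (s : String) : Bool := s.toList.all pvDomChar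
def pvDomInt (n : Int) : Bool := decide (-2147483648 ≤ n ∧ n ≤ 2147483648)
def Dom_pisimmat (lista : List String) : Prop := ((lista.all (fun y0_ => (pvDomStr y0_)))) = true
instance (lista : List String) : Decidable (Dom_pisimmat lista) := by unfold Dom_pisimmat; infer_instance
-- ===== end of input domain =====

-- B replaces A's single-pass running-max-with-reset loop by a two-pass max-then-filter (simpler decomposition, same O(n) cost).


-- ===== PORT A =====
-- loop body of A: state = (pisimmat, pisin_pituus); branch order as in the Python
def pisimmatStep (s : List String × Option Int) (sana : String) : List String × Option Int :=
  match s with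
  | (acc, pp) =>
    match pp with
    | none => (acc ++ [sana], some (PySem.Str.len sana))
    | some m =>
      if m = PySem.Str.len sana then (acc ++ [sana], some (PySem.Str.len sana))
      else if m < PySem.Str.len sana then ([sana], some (PySem.Str.len sana))
      else (acc, some m)

def pisimmat (lista : List String) : List String :=
  (lista.foldl pisimmatStep ([], none)).1

-- ===== PORT B =====
def pisimmat_alt (lista : List String) : List String :=
  match lista with
  | [] => []
  | x :: t =>
    -- m = max(len(s) for s in lista): Python max over a nonempty sequence = running max
    let m := t.foldl (fun a s => max a (PySem.Str.len s)) (PySem.Str.len x)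
    (x :: t).filter (fun s => decide (PySem.Str.len s = m))

-- ===== PRECONDITION & SPEC =====
def Spec_pisimmat (lista : List String) (out : List String) : Prop := out = pisimmat_alt lista
instance (lista : List String) (out : List String) : Decidable (Spec_pisimmat lista out) := by unfold Spec_pisimmat; infer_instance

-- ===== CLAIM (what is proved, stated in full; the proofs are below) =====
def Claim_equal_pisimmat : Prop := ∀ (lista : List String), Dom_pisimmat lista → Spec_pisimmat lista (pisimmat lista)

-- ===== LEMMAS AND PROOFS =====
-- Invariant of A's loop once pisin_pituus is set: with running state (acc, some m),
-- the loop returns the filter of the rest by the total max M, prefixed by acc iff M = m.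
theorem pisimmat_loop (l : List String) (acc : List String) (m : Int) :
    l.foldl pisimmatStep (acc, some m) =
      ((if l.foldl (fun a s => max a (PySem.Str.len s)) m = m then acc else []) ++
        l.filter (fun s => decide (PySem.Str.len s = l.foldl (fun a s => max a (PySem.Str.len s)) m)),
       some (l.foldl (fun a s => max a (PySem.Str.len s)) m)) := by
  induction l generalizing acc m with
  | nil => simp
  | cons s t ih =>
    simp only [List.foldl_cons, pisimmatStep]
    rcases lt_trichotomy m (PySem.Str.len s) with h | h | h
    · rw [if_neg (by omega), if_pos (by simpa using h), ih]
      have hm : max m (PySem.Str.len s) = PySem.Str.len s := by omega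
      have hmax := (PySem.List.le_foldl_max_int t PySem.Str.len (PySem.Str.len s)).1
      simp only [hm, List.filter_cons, decide_eq_true_eq]
      split_ifs <;> first | (exfalso; omega) | simp
    · subst h
      rw [if_pos rfl, ih]
      have hmax := (PySem.List.le_foldl_max_int t PySem.Str.len (PySem.Str.len s)).1
      simp only [max_self, List.filter_cons, decide_eq_true_eq]
      split_ifs <;> first | (exfalso; omega) | simp
    · rw [if_neg (by omega), if_neg (by simpa using not_lt.mpr (le_of_lt h)), ih]
      have hm : max m (PySem.Str.len s) = m := by omega
      have hmax := (PySem.List.le_foldl_max_int t PySem.Str.len m).1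
      simp only [hm, List.filter_cons, decide_eq_true_eq]
      split_ifs <;> first | (exfalso; omega) | simp

-- ===== VERDICT (by name: the statement is the Claim_ definition above) =====
theorem pisimmat_spec : Claim_equal_pisimmat := by
  intro lista _
  unfold Spec_pisimmat pisimmat pisimmat_alt
  match lista with
  | [] => rfl
  | x :: t =>
    simp only [List.foldl_cons, pisimmatStep, List.nil_append]
    rw [pisimmat_loop]
    have hmax := (PySem.List.le_foldl_max_int t PySem.Str.len (PySem.Str.len x)).1
    simp only [List.filter_cons, decide_eq_true_eq]
    split_ifs <;> first | (exfalso; omega) | simp
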